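-- pv_equiv track=rewrite | github.com/Lmx154/CSCI3329 | labs/hw1-2.py | count_infected_computers
-- ===== SOURCE A (Python) =====
-- def count_infected_computers(n, edges, initial):
--     nearby_list = {i: [] for i in range(1, n + 1)}
--     for edge in edges:
--         nearby_list[edge[0]].append(edge[1])
--         nearby_list[edge[1]].append(edge[0])
--
--     visited = set()
--
--     def dfs(computer):
--         if computer in visited:
--             return 0
--         visited.add(computer)
--         infected_count = 1  # Count this computer as infected
--         for neighbor in nearby_list[computer]:
--             infected_count += dfs(neighbor)
--         return infected_count
--
--     total_infected = dfs(initial) - 1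
--     return total_infected
-- ===== SOURCE B (Python) =====
-- def count_infected_computers(n, edges, initial):
--     adj = {i: [] for i in range(1, n + 1)}
--     for a, b in edges:
--         adj[a].append(b)
--         adj[b].append(a)
--     visited = set()
--     stack = [initial]
--     while stack:
--         node = stack.pop()
--         if node not in visited:
--             visited.add(node)
--             stack.extend(adj[node])
--     return len(visited) - 1
-- ===== Notes on version B (the rewrite author's own statement) =====
-- stated objective: idiomatic
-- what changed: Replaces the recursive DFS with its running counter by an iterative explicit-stack traversal over the same adjacency dict, returning len(visited)-1.
import Mathlib
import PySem

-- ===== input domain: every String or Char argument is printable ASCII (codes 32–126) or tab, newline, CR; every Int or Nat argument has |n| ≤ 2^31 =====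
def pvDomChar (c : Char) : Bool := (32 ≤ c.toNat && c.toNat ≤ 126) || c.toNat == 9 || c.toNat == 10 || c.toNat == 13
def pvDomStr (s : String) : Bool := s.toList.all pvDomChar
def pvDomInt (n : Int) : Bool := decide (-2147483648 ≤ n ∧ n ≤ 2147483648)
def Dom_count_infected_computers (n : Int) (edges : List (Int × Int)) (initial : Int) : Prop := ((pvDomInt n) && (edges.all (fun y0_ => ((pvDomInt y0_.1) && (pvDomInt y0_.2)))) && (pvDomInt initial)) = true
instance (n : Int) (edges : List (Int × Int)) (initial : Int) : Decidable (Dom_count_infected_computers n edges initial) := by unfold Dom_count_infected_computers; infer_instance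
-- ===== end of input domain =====

-- B replaces A's recursive DFS (counter + n-seeded dict, return-value recursion) by an iterative
-- explicit-stack traversal over the same dict, returning len(visited)-1 (idiomatic; same cost).

-- ===== PORT A =====
-- 'nearby_list[e].append(x)' is ported as modify-with-default []; the KeyError case (key absent)
-- is excluded by Pre_.  The recursive dfs carries fuel n.toNat+1 as a totality guard only: under
-- Pre_ every visited node lies in 1..n, so the fuel is never exhausted (proved below).
def pvStepAdj (d : PySem.Dict Int (List Int)) (e : Int × Int) : PySem.Dict Int (List Int) :=
  (d.modify e.1 [] (· ++ [e.2])).modify e.2 [] (· ++ [e.1])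

mutual
  def pvDfs (adj : PySem.Dict Int (List Int)) (fuel : Nat) (visited : PySem.Set Int)
      (computer : Int) : Int × PySem.Set Int :=
    match fuel with
    | 0 => (0, visited)
    | f + 1 =>
      if PySem.Set.contains visited computer then (0, visited)
      else pvDfsList adj f (PySem.Set.add visited computer) (adj.getD computer []) 1
  termination_by (fuel, 0)
  def pvDfsList (adj : PySem.Dict Int (List Int)) (fuel : Nat) (visited : PySem.Set Int)
      (ns : List Int) (acc : Int) : Int × PySem.Set Int :=
    match ns with
    | [] => (acc, visited)
    | x :: rest =>
      let r := pvDfs adj fuel visited x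
      pvDfsList adj fuel r.2 rest (acc + r.1)
  termination_by (fuel, ns.length + 1)
end

def count_infected_computers (n : Int) (edges : List (Int × Int)) (initial : Int) : Int :=
  let nearby :=
    edges.foldl pvStepAdj
      ((PySem.List.pyRange 1 (n + 1) 1).foldl (fun d i => d.insert i ([] : List Int))
        PySem.Dict.empty)
  (pvDfs nearby (n.toNat + 1) PySem.Set.empty initial).1 - 1

-- ===== PORT B =====
-- B builds the same 1..n-seeded dict ('adj[a].append(b)' is again modify-with-default, KeyError
-- excluded by Pre_); stack top is the list head (Python pops from the end, so a push of l is
-- 'l.reverse ++ rest').  The fuel is a totality guard only; under Pre_ it is never exhausted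
-- (proved below).
def pvLoop (adj : PySem.Dict Int (List Int)) (fuel : Nat) (visited : PySem.Set Int)
    (stack : List Int) : PySem.Set Int :=
  match fuel, stack with
  | _, [] => visited
  | 0, _ :: _ => visited
  | f + 1, node :: rest =>
    if PySem.Set.contains visited node then pvLoop adj f visited rest
    else pvLoop adj f (PySem.Set.add visited node) ((adj.getD node []).reverse ++ rest)

def count_infected_computers_alt (n : Int) (edges : List (Int × Int)) (initial : Int) : Int :=
  let adj :=
    edges.foldl pvStepAdj
      ((PySem.List.pyRange 1 (n + 1) 1).foldl (fun d i => d.insert i ([] : List Int))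
        PySem.Dict.empty)
  ((pvLoop adj ((n.toNat + 1) * (2 * edges.length + 1) + 2) PySem.Set.empty [initial]).length : Int)
    - 1

-- ===== PRECONDITION & SPEC =====
-- Pre_: exactly the inputs where Python A returns normally — initial and all edge endpoints must
-- be keys of the 1..n-seeded dict, otherwise A raises KeyError.
def Pre_count_infected_computers (n : Int) (edges : List (Int × Int)) (initial : Int) : Prop :=
  (1 ≤ initial ∧ initial ≤ n) ∧ ∀ e ∈ edges, (1 ≤ e.1 ∧ e.1 ≤ n) ∧ (1 ≤ e.2 ∧ e.2 ≤ n)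
instance (n : Int) (edges : List (Int × Int)) (initial : Int) :
    Decidable (Pre_count_infected_computers n edges initial) := by
  unfold Pre_count_infected_computers; infer_instance

def pvWitness_count_infected_computers : Int × (List (Int × Int)) × Int := (3, [(1, 2)], 1)

def Spec_count_infected_computers (n : Int) (edges : List (Int × Int)) (initial : Int)
    (out : Int) : Prop := out = count_infected_computers_alt n edges initial
instance (n : Int) (edges : List (Int × Int)) (initial : Int) (out : Int) :
    Decidable (Spec_count_infected_computers n edges initial out) := by
  unfold Spec_count_infected_computers; infer_instance

-- ===== CLAIM (what is proved, stated in full; the proofs are below) =====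
def Claim_equal_count_infected_computers : Prop :=
  ∀ (n : Int) (edges : List (Int × Int)) (initial : Int),
    Dom_count_infected_computers n edges initial →
    Pre_count_infected_computers n edges initial →
    Spec_count_infected_computers n edges initial (count_infected_computers n edges initial)

-- ===== LEMMAS AND PROOFS =====

-- The per-node neighbour list both dicts end up holding: for each edge, b if a = v, then a if b = v.
def pvScan (edges : List (Int × Int)) (v : Int) : List Int :=
  edges.flatMap fun e => (if e.1 = v then [e.2] else []) ++ (if e.2 = v then [e.1] else [])

theorem pvScan_cons (e : Int × Int) (es : List (Int × Int)) (v : Int) :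
    pvScan (e :: es) v
      = ((if e.1 = v then [e.2] else []) ++ (if e.2 = v then [e.1] else [])) ++ pvScan es v := by
  simp [pvScan]

theorem getD_pvStepAdj (d : PySem.Dict Int (List Int)) (e : Int × Int) (v : Int) :
    (pvStepAdj d e).getD v [] =
      d.getD v [] ++ ((if e.1 = v then [e.2] else []) ++ (if e.2 = v then [e.1] else [])) := by
  simp only [pvStepAdj, PySem.Dict.getD_modify]
  by_cases h2 : v = e.2 <;> by_cases h1 : v = e.1 <;> simp_all [eq_comm]

theorem getD_foldl_pvStepAdj (edges : List (Int × Int)) (d : PySem.Dict Int (List Int)) (v : Int) :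
    (edges.foldl pvStepAdj d).getD v [] = d.getD v [] ++ pvScan edges v := by
  induction edges generalizing d with
  | nil => simp [pvScan]
  | cons e es ih =>
    simp only [List.foldl_cons, ih, getD_pvStepAdj, pvScan_cons, List.append_assoc]

theorem getD_seed (l : List Int) (d : PySem.Dict Int (List Int)) (v : Int)
    (h : d.getD v [] = []) :
    (l.foldl (fun d i => d.insert i ([] : List Int)) d).getD v [] = [] := by
  induction l generalizing d with
  | nil => simpa using h
  | cons i is ih =>
    rw [List.foldl_cons]
    refine ih _ ?_
    rw [PySem.Dict.getD_insert]
    split_ifs with hv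
    · rfl
    · exact h

theorem mem_pvScan {edges : List (Int × Int)} {v z : Int} (h : z ∈ pvScan edges v) :
    ∃ e ∈ edges, (e.1 = v ∧ z = e.2) ∨ (e.2 = v ∧ z = e.1) := by
  simp only [pvScan, List.mem_flatMap, List.mem_append] at h
  obtain ⟨e, he, hz⟩ := h
  refine ⟨e, he, ?_⟩
  rcases hz with hz | hz <;> [left; right] <;>
    · split_ifs at hz with hc
      · simp at hz; exact ⟨hc, hz⟩
      · simp at hz

theorem length_pvScan_le (edges : List (Int × Int)) (v : Int) :
    (pvScan edges v).length ≤ 2 * edges.length := by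
  induction edges with
  | nil => simp [pvScan]
  | cons e es ih =>
    simp only [pvScan, List.flatMap_cons, List.length_append] at *
    have : ((if e.1 = v then [e.2] else []) ++ (if e.2 = v then [e.1] else [])).length ≤ 2 := by
      split_ifs <;> simp
    simp only [List.length_append] at this ⊢
    simp only [List.length_cons]
    omega

-- Reachability in the neighbour graph.
inductive pvReach (g : Int → List Int) (s : Int) : Int → Prop
  | refl : pvReach g s s
  | step {v w : Int} : pvReach g s v → w ∈ g v → pvReach g s w

theorem pvReach_trans {g : Int → List Int} {a b c : Int}
    (h1 : pvReach g a b) (h2 : pvReach g b c) : pvReach g a c := by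
  induction h2 with
  | refl => exact h1
  | step _ hm ih => exact pvReach.step ih hm

theorem pvReach_mem {g : Int → List Int} {s y : Int} {W : List Int}
    (hs : s ∈ W) (hcl : ∀ a ∈ W, ∀ z ∈ g a, z ∈ W) (h : pvReach g s y) : y ∈ W := by
  induction h with
  | refl => exact hs
  | step _ hm ih => exact hcl _ ih _ hm

-- count of still-unvisited in-range nodes: the fuel measure of both traversals
def pvUnvis (n : Int) (visited : List Int) : Nat :=
  (PySem.List.pyRange 1 (n + 1) 1).countP fun k => !(PySem.Set.contains visited k)

theorem pvUnvis_le {n : Int} {visited V : List Int} (h : visited ⊆ V) :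
    pvUnvis n V ≤ pvUnvis n visited := by
  apply List.countP_mono_left
  intro k _ hk
  simp only [Bool.not_eq_eq_eq_not, Bool.not_true, PySem.Set.contains_eq_listContains] at *
  simp only [List.contains_eq_mem, decide_eq_false_iff_not] at *
  exact fun hm => hk (h hm)

theorem pvUnvis_zero {n : Int} {visited : List Int} (h : pvUnvis n visited = 0)
    {x : Int} (h1 : 1 ≤ x) (h2 : x ≤ n) : x ∈ visited := by
  rw [pvUnvis, List.countP_eq_zero] at h
  have hx : x ∈ PySem.List.pyRange 1 (n + 1) 1 := by
    rw [PySem.List.mem_pyRange_one]; omega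
  simpa using h x hx

theorem pvUnvis_add {n x : Int} {visited : List Int} (hx : x ∉ visited)
    (h1 : 1 ≤ x) (h2 : x ≤ n) :
    pvUnvis n (PySem.Set.add visited x) + 1 = pvUnvis n visited := by
  have hnd : (PySem.List.pyRange 1 (n + 1) 1).Nodup := PySem.List.nodup_pyRange_one 1 (n + 1)
  have hxU : x ∈ PySem.List.pyRange 1 (n + 1) 1 := by
    rw [PySem.List.mem_pyRange_one]; omega
  have hndf : ((PySem.List.pyRange 1 (n + 1) 1).filter
      (fun k => !(PySem.Set.contains visited k))).Nodup := hnd.filter _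
  have hxf : x ∈ (PySem.List.pyRange 1 (n + 1) 1).filter
      (fun k => !(PySem.Set.contains visited k)) := by
    rw [List.mem_filter]
    exact ⟨hxU, by simp [hx]⟩
  have hmain : pvUnvis n (PySem.Set.add visited x)
      = ((PySem.List.pyRange 1 (n + 1) 1).filter
          (fun k => !(PySem.Set.contains visited k))).length - 1 := by
    rw [pvUnvis, PySem.Set.add_of_not_mem hx, List.countP_eq_length_filter]
    have h2 : (PySem.List.pyRange 1 (n + 1) 1).filter
        (fun k => !(PySem.Set.contains (visited ++ [x]) k))
        = ((PySem.List.pyRange 1 (n + 1) 1).filter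
            (fun k => !(PySem.Set.contains visited k))).filter (fun k => k != x) := by
      rw [List.filter_filter]
      apply List.filter_congr
      intro k _
      by_cases hkx : k = x <;> simp [hkx]
    rw [h2, ← hndf.erase_eq_filter]
    · exact List.length_erase_of_mem hxf
  have hpos : 0 < ((PySem.List.pyRange 1 (n + 1) 1).filter
      (fun k => !(PySem.Set.contains visited k))).length := List.length_pos_of_mem hxf
  rw [hmain, pvUnvis, List.countP_eq_length_filter]
  omega

-- what a finished traversal must produce: the reachable set of the start node
structure pvIsClosure (g : Int → List Int) (s : Int) (W : List Int) : Prop where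
  nodup : W.Nodup
  start : s ∈ W
  closed : ∀ a ∈ W, ∀ z ∈ g a, z ∈ W
  sound : ∀ y ∈ W, pvReach g s y

theorem pvIsClosure_length_eq {g : Int → List Int} {s : Int} {V W : List Int}
    (hV : pvIsClosure g s V) (hW : pvIsClosure g s W) : V.length = W.length := by
  have hperm : V.Perm W := by
    rw [List.perm_ext_iff_of_nodup hV.nodup hW.nodup]
    intro a
    constructor
    · intro h; exact pvReach_mem hW.start hW.closed (hV.sound a h)
    · intro h; exact pvReach_mem hV.start hV.closed (hW.sound a h)
  exact hperm.length_eq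

-- ===== the A-side invariant =====

structure pvDfsConcl (g : Int → List Int) (visited : List Int) (x : Int)
    (r : Int × PySem.Set Int) : Prop where
  prefix_ : visited <+: r.2
  nodup : r.2.Nodup
  startMem : x ∈ r.2
  sound : ∀ y ∈ r.2, y ∈ visited ∨ pvReach g x y
  closed : ∀ y ∈ r.2, y ∉ visited → ∀ z ∈ g y, z ∈ r.2
  count : r.1 + (visited.length : Int) = r.2.length

structure pvDfsListConcl (g : Int → List Int) (visited : List Int) (ns : List Int) (acc : Int)
    (r : Int × PySem.Set Int) : Prop where
  prefix_ : visited <+: r.2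
  nodup : r.2.Nodup
  elemsMem : ∀ x ∈ ns, x ∈ r.2
  sound : ∀ y ∈ r.2, y ∈ visited ∨ ∃ x ∈ ns, pvReach g x y
  closed : ∀ y ∈ r.2, y ∉ visited → ∀ z ∈ g y, z ∈ r.2
  count : r.1 + (visited.length : Int) = acc + r.2.length

theorem pvDfs_visited (adj : PySem.Dict Int (List Int)) (fuel : Nat) (visited : PySem.Set Int)
    (x : Int) (h : PySem.Set.contains visited x = true) :
    pvDfs adj fuel visited x = (0, visited) := by
  cases fuel with
  | zero => simp [pvDfs]
  | succ f =>
    have hm : x ∈ visited := (PySem.Set.contains_iff _ _).mp h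
    rw [pvDfs]; simp [hm]

theorem pvDfs_spec (adj : PySem.Dict Int (List Int)) (n : Int) (g : Int → List Int)
    (hadj : ∀ v, adj.getD v [] = g v)
    (hrange : ∀ v z, z ∈ g v → (1 ≤ z ∧ z ≤ n)) :
    ∀ fuel : Nat,
      (∀ (visited : PySem.Set Int) (x : Int), visited.Nodup → 1 ≤ x → x ≤ n →
        pvUnvis n visited ≤ fuel →
        pvDfsConcl g visited x (pvDfs adj fuel visited x)) ∧
      (∀ (visited : PySem.Set Int) (ns : List Int) (acc : Int), visited.Nodup →
        (∀ x ∈ ns, 1 ≤ x ∧ x ≤ n) → pvUnvis n visited ≤ fuel →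
        pvDfsListConcl g visited ns acc (pvDfsList adj fuel visited ns acc)) := by
  intro fuel
  induction fuel with
  | zero =>
    constructor
    · intro visited x hnd hx1 hx2 hfuel
      have hxv : x ∈ visited := pvUnvis_zero (Nat.le_zero.mp hfuel) hx1 hx2
      rw [show pvDfs adj 0 visited x = (0, visited) by simp [pvDfs]]
      exact ⟨List.prefix_rfl, hnd, hxv, fun y hy => Or.inl hy,
        fun y hy hyv => absurd hy hyv, by simp⟩
    · intro visited ns acc
      induction ns generalizing acc with
      | nil =>
        intro hnd hns hfuel
        rw [show pvDfsList adj 0 visited [] acc = (acc, visited) by simp [pvDfsList]]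
        exact ⟨List.prefix_rfl, hnd, by simp, fun y hy => Or.inl hy,
          fun y hy hyv => absurd hy hyv, by simp⟩
      | cons x rest ihns =>
        intro hnd hns hfuel
        have hxv : x ∈ visited :=
          pvUnvis_zero (Nat.le_zero.mp hfuel) (hns x List.mem_cons_self).1 (hns x List.mem_cons_self).2
        have hc : PySem.Set.contains visited x = true := (PySem.Set.contains_iff _ _).mpr hxv
        have heq : pvDfsList adj 0 visited (x :: rest) acc
            = pvDfsList adj 0 visited rest (acc + 0) := by
          rw [pvDfsList]; rw [pvDfs_visited adj 0 visited x hc]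
        rw [heq]
        have L := ihns (acc + 0) hnd (fun y hy => hns y (List.mem_cons_of_mem _ hy)) hfuel
        exact ⟨L.prefix_, L.nodup,
          fun y hy => by
            rcases List.mem_cons.mp hy with h | h
            · exact L.prefix_.subset (h ▸ hxv)
            · exact L.elemsMem y h,
          fun y hy => by
            rcases L.sound y hy with h | ⟨x', hx', hr⟩
            · exact Or.inl h
            · exact Or.inr ⟨x', List.mem_cons_of_mem _ hx', hr⟩,
          L.closed, by have := L.count; omega⟩
  | succ f ihf =>
    have hdfs : ∀ (visited : PySem.Set Int) (x : Int), visited.Nodup → 1 ≤ x → x ≤ n →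
        pvUnvis n visited ≤ f + 1 →
        pvDfsConcl g visited x (pvDfs adj (f + 1) visited x) := by
      intro visited x hnd hx1 hx2 hfuel
      by_cases hc : PySem.Set.contains visited x = true
      · have hxv : x ∈ visited := (PySem.Set.contains_iff _ _).mp hc
        rw [pvDfs_visited adj (f + 1) visited x hc]
        exact ⟨List.prefix_rfl, hnd, hxv, fun y hy => Or.inl hy,
          fun y hy hyv => absurd hy hyv, by simp⟩
      · have hxv : x ∉ visited := fun h => hc ((PySem.Set.contains_iff _ _).mpr h)
        have heq : pvDfs adj (f + 1) visited x
            = pvDfsList adj f (PySem.Set.add visited x) (g x) 1 := by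
          rw [pvDfs]; simp [hxv, hadj]
        rw [heq]
        have hfuel' : pvUnvis n (PySem.Set.add visited x) ≤ f := by
          have := pvUnvis_add hxv hx1 hx2
          omega
        have L := ihf.2 (PySem.Set.add visited x) (g x) 1
          (PySem.Set.nodup_add visited x hnd) (fun z hz => hrange x z hz) hfuel'
        have hpre : visited <+: PySem.Set.add visited x := by
          rw [PySem.Set.add_of_not_mem hxv]; exact List.prefix_append _ _
        have hxmem : x ∈ PySem.Set.add visited x := (PySem.Set.mem_add _ _ _).mpr (Or.inr rfl)
        refine ⟨hpre.trans L.prefix_, L.nodup, L.prefix_.subset hxmem, ?_, ?_, ?_⟩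
        · intro y hy
          rcases L.sound y hy with h | ⟨z, hz, hr⟩
          · rcases (PySem.Set.mem_add _ _ _).mp h with h' | h'
            · exact Or.inl h'
            · exact Or.inr (h' ▸ pvReach.refl)
          · exact Or.inr (pvReach_trans (pvReach.step pvReach.refl hz) hr)
        · intro y hy hyv z hz
          by_cases hyx : y = x
          · exact L.elemsMem z (hyx ▸ hz)
          · have : y ∉ PySem.Set.add visited x := by
              rw [PySem.Set.mem_add]; rintro (h | h) <;> [exact hyv h; exact hyx h]
            exact L.closed y hy this z hz
        · have hlen : ((PySem.Set.add visited x).length : Int) = visited.length + 1 := by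
            rw [PySem.Set.add_of_not_mem hxv]; simp
          have := L.count
          omega
    refine ⟨hdfs, ?_⟩
    intro visited ns acc
    induction ns generalizing visited acc with
    | nil =>
      intro hnd hns hfuel
      rw [show pvDfsList adj (f + 1) visited [] acc = (acc, visited) by simp [pvDfsList]]
      exact ⟨List.prefix_rfl, hnd, by simp, fun y hy => Or.inl hy,
        fun y hy hyv => absurd hy hyv, by simp⟩
    | cons x rest ihns =>
      intro hnd hns hfuel
      have heq : pvDfsList adj (f + 1) visited (x :: rest) acc
          = pvDfsList adj (f + 1) (pvDfs adj (f + 1) visited x).2 rest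
              (acc + (pvDfs adj (f + 1) visited x).1) := by
        rw [pvDfsList]
      rw [heq]
      have D := hdfs visited x hnd (hns x List.mem_cons_self).1 (hns x List.mem_cons_self).2 hfuel
      have hfuel2 : pvUnvis n (pvDfs adj (f + 1) visited x).2 ≤ f + 1 :=
        le_trans (pvUnvis_le D.prefix_.subset) hfuel
      have L := ihns (pvDfs adj (f + 1) visited x).2 (acc + (pvDfs adj (f + 1) visited x).1)
        D.nodup (fun y hy => hns y (List.mem_cons_of_mem _ hy)) hfuel2
      refine ⟨D.prefix_.trans L.prefix_, L.nodup, ?_, ?_, ?_, ?_⟩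
      · intro y hy
        rcases List.mem_cons.mp hy with h | h
        · exact L.prefix_.subset (h ▸ D.startMem)
        · exact L.elemsMem y h
      · intro y hy
        rcases L.sound y hy with h | ⟨x', hx', hr⟩
        · rcases D.sound y h with h' | h'
          · exact Or.inl h'
          · exact Or.inr ⟨x, List.mem_cons_self, h'⟩
        · exact Or.inr ⟨x', List.mem_cons_of_mem _ hx', hr⟩
      · intro y hy hyv z hz
        by_cases hy1 : y ∈ (pvDfs adj (f + 1) visited x).2
        · exact L.prefix_.subset (D.closed y hy1 hyv z hz)
        · exact L.closed y hy hy1 z hz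
      · have h1 := D.count
        have h2 := L.count
        omega

-- ===== the B-side invariant =====

structure pvLoopConcl (g : Int → List Int) (visited : List Int) (stack : List Int)
    (W : List Int) : Prop where
  prefix_ : visited <+: W
  nodup : W.Nodup
  stackMem : ∀ x ∈ stack, x ∈ W
  sound : ∀ y ∈ W, y ∈ visited ∨ ∃ x ∈ stack, pvReach g x y
  closed : ∀ y ∈ W, y ∉ visited → ∀ z ∈ g y, z ∈ W

theorem pvLoop_spec (adj : PySem.Dict Int (List Int)) (n : Int) (g : Int → List Int) (L : Nat)
    (hadj : ∀ v, adj.getD v [] = g v)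
    (hrange : ∀ v z, z ∈ g v → (1 ≤ z ∧ z ≤ n))
    (hlen : ∀ v, (g v).length ≤ L) :
    ∀ (fuel : Nat) (visited : PySem.Set Int) (stack : List Int), visited.Nodup →
      (∀ x ∈ stack, 1 ≤ x ∧ x ≤ n) →
      pvUnvis n visited * (L + 1) + stack.length + 1 ≤ fuel →
      pvLoopConcl g visited stack (pvLoop adj fuel visited stack) := by
  intro fuel
  induction fuel with
  | zero =>
    intro visited stack hnd hst hfuel
    omega
  | succ f ih =>
    intro visited stack hnd hst hfuel
    match stack with
    | [] =>
      rw [show pvLoop adj (f + 1) visited [] = visited by rw [pvLoop]]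
      exact ⟨List.prefix_rfl, hnd, by simp, fun y hy => Or.inl hy,
        fun y hy hyv => absurd hy hyv⟩
    | node :: rest =>
      by_cases hc : node ∈ visited
      · have heq : pvLoop adj (f + 1) visited (node :: rest) = pvLoop adj f visited rest := by
          rw [pvLoop]; simp [hc]
        rw [heq]
        have hfuel' : pvUnvis n visited * (L + 1) + rest.length + 1 ≤ f := by
          simp only [List.length_cons] at hfuel; omega
        have L2 := ih visited rest hnd (fun x hx => hst x (List.mem_cons_of_mem _ hx)) hfuel'
        refine ⟨L2.prefix_, L2.nodup, ?_, ?_, L2.closed⟩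
        · intro x hx
          rcases List.mem_cons.mp hx with h | h
          · exact L2.prefix_.subset (h ▸ hc)
          · exact L2.stackMem x h
        · intro y hy
          rcases L2.sound y hy with h | ⟨x, hx, hr⟩
          · exact Or.inl h
          · exact Or.inr ⟨x, List.mem_cons_of_mem _ hx, hr⟩
      · have heq : pvLoop adj (f + 1) visited (node :: rest)
            = pvLoop adj f (PySem.Set.add visited node) ((g node).reverse ++ rest) := by
          rw [pvLoop]; simp [hc, hadj]
        rw [heq]
        have hnode := hst node List.mem_cons_self
        have hdec := pvUnvis_add hc hnode.1 hnode.2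
        have hfuel' : pvUnvis n (PySem.Set.add visited node) * (L + 1)
            + ((g node).reverse ++ rest).length + 1 ≤ f := by
          have hL := hlen node
          simp only [List.length_append, List.length_reverse, List.length_cons] at hfuel ⊢
          set u := pvUnvis n (PySem.Set.add visited node) with hu
          rw [← hdec] at hfuel
          have hexp : (u + 1) * (L + 1) = u * (L + 1) + (L + 1) := by ring
          rw [hexp] at hfuel
          omega
        have hst' : ∀ x ∈ (g node).reverse ++ rest, 1 ≤ x ∧ x ≤ n := by
          intro x hx
          rcases List.mem_append.mp hx with h | h
          · exact hrange node x (List.mem_reverse.mp h)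
          · exact hst x (List.mem_cons_of_mem _ h)
        have L2 := ih (PySem.Set.add visited node) ((g node).reverse ++ rest)
          (PySem.Set.nodup_add visited node hnd) hst' hfuel'
        have hpre : visited <+: PySem.Set.add visited node := by
          rw [PySem.Set.add_of_not_mem hc]; exact List.prefix_append _ _
        have hnmem : node ∈ PySem.Set.add visited node := (PySem.Set.mem_add _ _ _).mpr (Or.inr rfl)
        refine ⟨hpre.trans L2.prefix_, L2.nodup, ?_, ?_, ?_⟩
        · intro x hx
          rcases List.mem_cons.mp hx with h | h
          · exact L2.prefix_.subset (h ▸ hnmem)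
          · exact L2.stackMem x (List.mem_append.mpr (Or.inr h))
        · intro y hy
          rcases L2.sound y hy with h | ⟨x, hx, hr⟩
          · rcases (PySem.Set.mem_add _ _ _).mp h with h' | h'
            · exact Or.inl h'
            · exact Or.inr ⟨node, List.mem_cons_self, h' ▸ pvReach.refl⟩
          · rcases List.mem_append.mp hx with h' | h'
            · exact Or.inr ⟨node, List.mem_cons_self,
                pvReach_trans (pvReach.step pvReach.refl (List.mem_reverse.mp h')) hr⟩
            · exact Or.inr ⟨x, List.mem_cons_of_mem _ h', hr⟩
        · intro y hy hyv z hz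
          by_cases hyn : y = node
          · exact L2.stackMem z (List.mem_append.mpr (Or.inl (List.mem_reverse.mpr (hyn ▸ hz))))
          · have : y ∉ PySem.Set.add visited node := by
              rw [PySem.Set.mem_add]; rintro (h | h) <;> [exact hyv h; exact hyn h]
            exact L2.closed y hy this z hz

-- ===== assembly =====

theorem count_infected_computers_assemble (n : Int) (edges : List (Int × Int)) (initial : Int)
    (hpre : Pre_count_infected_computers n edges initial) :
    count_infected_computers n edges initial = count_infected_computers_alt n edges initial := by
  obtain ⟨⟨hi1, hi2⟩, hedge⟩ := hpre
  set g : Int → List Int := pvScan edges with hg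
  have hrange : ∀ v z, z ∈ g v → (1 ≤ z ∧ z ≤ n) := by
    intro v z hz
    obtain ⟨e, he, hcase⟩ := mem_pvScan hz
    rcases hcase with ⟨-, hz2⟩ | ⟨-, hz2⟩
    · exact hz2 ▸ ⟨(hedge e he).2.1, (hedge e he).2.2⟩
    · exact hz2 ▸ ⟨(hedge e he).1.1, (hedge e he).1.2⟩
  have hadjA : ∀ v,
      (edges.foldl pvStepAdj
        ((PySem.List.pyRange 1 (n + 1) 1).foldl (fun d i => d.insert i ([] : List Int))
          PySem.Dict.empty)).getD v [] = g v := by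
    intro v
    rw [getD_foldl_pvStepAdj, getD_seed _ _ _ (by simp [PySem.Dict.getD_empty])]
    simp [hg]
  have hUlen : pvUnvis n ([] : PySem.Set Int) ≤ n.toNat := by
    have h1 := List.countP_le_length
      (l := PySem.List.pyRange 1 (n + 1) 1) (p := fun k => !(PySem.Set.contains ([] : PySem.Set Int) k))
    rw [pvUnvis]
    have h2 : (PySem.List.pyRange 1 (n + 1) 1).length = (n + 1 - 1).toNat :=
      PySem.List.length_pyRange_one 1 (n + 1)
    omega
  -- A side
  have DA := (pvDfs_spec _ n g hadjA hrange (n.toNat + 1)).1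
    ([] : PySem.Set Int) initial List.nodup_nil hi1 hi2 (by omega)
  -- B side
  have LB := pvLoop_spec _ n g (2 * edges.length) hadjA hrange (length_pvScan_le edges)
    ((n.toNat + 1) * (2 * edges.length + 1) + 2) ([] : PySem.Set Int) [initial]
    List.nodup_nil (by intro x hx; rw [List.mem_singleton] at hx; exact hx ▸ ⟨hi1, hi2⟩)
    (by
      have hmul : pvUnvis n ([] : PySem.Set Int) * (2 * edges.length + 1)
          ≤ (n.toNat + 1) * (2 * edges.length + 1) :=
        Nat.mul_le_mul_right _ (by omega)
      simp only [List.length_singleton]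
      linarith)
  -- both results are the reachable set of initial
  have hCA : pvIsClosure g initial (pvDfs _ (n.toNat + 1) ([] : PySem.Set Int) initial).2 :=
    ⟨DA.nodup, DA.startMem,
      fun a ha z hz => DA.closed a ha (List.not_mem_nil) z hz,
      fun y hy => (DA.sound y hy).resolve_left List.not_mem_nil⟩
  have hCB : pvIsClosure g initial
      (pvLoop _ ((n.toNat + 1) * (2 * edges.length + 1) + 2) ([] : PySem.Set Int) [initial]) :=
    ⟨LB.nodup, LB.stackMem initial (List.mem_singleton_self initial),
      fun a ha z hz => LB.closed a ha (List.not_mem_nil) z hz,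
      fun y hy => by
        rcases (LB.sound y hy).resolve_left List.not_mem_nil with ⟨x, hx, hr⟩
        rw [List.mem_singleton] at hx
        exact hx ▸ hr⟩
  have hlen := pvIsClosure_length_eq hCA hCB
  have hcount := DA.count
  simp only [count_infected_computers, count_infected_computers_alt, PySem.Set.empty]
  simp only [List.length_nil, Nat.cast_zero, add_zero] at hcount
  rw [hcount]
  omega

-- ===== VERDICT (by name: the statement is the Claim_ definition above) =====
theorem count_infected_computers_spec : Claim_equal_count_infected_computers := by
  intro n edges initial _ hpre
  exact count_infected_computers_assemble n edges initial hpre
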